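-- pv_equiv track=rewrite | github.com/u-blusky/libephemeris | compare_scripts/tests/test_moshier/test_moshier_compare_retflag.py | _flag_bits_description
-- ===== SOURCE A (Python) =====
-- def _flag_bits_description(flag: int) -> str:
--     """Return a human-readable description of set flag bits."""
--     known_bits = [
--         (0x00001, "SEFLG_JPLEPH"),
--         (0x00002, "SEFLG_SWIEPH"),
--         (0x00004, "SEFLG_MOSEPH"),
--         (0x00008, "SEFLG_HELCTR"),
--         (0x00010, "SEFLG_TRUEPOS"),
--         (0x00020, "SEFLG_J2000"),
--         (0x00040, "SEFLG_NONUT"),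
--         (0x00080, "SEFLG_SPEED3"),
--         (0x00100, "SEFLG_SPEED"),
--         (0x00200, "SEFLG_NOGDEFL"),
--         (0x00400, "SEFLG_NOABERR"),
--         (0x00800, "SEFLG_EQUATORIAL"),
--         (0x01000, "SEFLG_XYZ"),
--         (0x02000, "SEFLG_RADIANS"),
--         (0x04000, "SEFLG_BARYCTR"),
--         (0x08000, "SEFLG_TOPOCTR"),
--         (0x10000, "SEFLG_SIDEREAL"),
--         (0x20000, "SEFLG_ICRS"),
--     ]
--     parts = []
--     for bit, name in known_bits:
--         if flag & bit:
--             parts.append(name)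
--     return " | ".join(parts) if parts else "0"
-- ===== SOURCE B (Python) =====
-- _NAMES_BY_BIT = {
--     0x00001: "SEFLG_JPLEPH",
--     0x00002: "SEFLG_SWIEPH",
--     0x00004: "SEFLG_MOSEPH",
--     0x00008: "SEFLG_HELCTR",
--     0x00010: "SEFLG_TRUEPOS",
--     0x00020: "SEFLG_J2000",
--     0x00040: "SEFLG_NONUT",
--     0x00080: "SEFLG_SPEED3",
--     0x00100: "SEFLG_SPEED",
--     0x00200: "SEFLG_NOGDEFL",
--     0x00400: "SEFLG_NOABERR",
--     0x00800: "SEFLG_EQUATORIAL",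
--     0x01000: "SEFLG_XYZ",
--     0x02000: "SEFLG_RADIANS",
--     0x04000: "SEFLG_BARYCTR",
--     0x08000: "SEFLG_TOPOCTR",
--     0x10000: "SEFLG_SIDEREAL",
--     0x20000: "SEFLG_ICRS",
-- }
--
--
-- def _flag_bits_description(flag: int) -> str:
--     """Return a human-readable description of set flag bits."""
--     m = flag & 0x3FFFF  # restrict to the 18 known bits (makes m non-negative)
--     parts = []
--     while m:
--         lb = m & -m          # lowest set bit, as a power of two
--         parts.append(_NAMES_BY_BIT[lb])
--         m &= m - 1           # clear that bit
--     return " | ".join(parts) or "0"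
-- ===== Notes on version B (the rewrite author's own statement) =====
-- stated objective: alternative
-- what changed: Instead of scanning the fixed (bit, name) table and testing flag & bit for each entry, B masks the flag once and then iterates only over the SET bits of the masked value, extracting the lowest set bit with m & -m, looking its name up in a dict keyed by bit value, and clearing it with m &= m - 1.
import Mathlib
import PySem

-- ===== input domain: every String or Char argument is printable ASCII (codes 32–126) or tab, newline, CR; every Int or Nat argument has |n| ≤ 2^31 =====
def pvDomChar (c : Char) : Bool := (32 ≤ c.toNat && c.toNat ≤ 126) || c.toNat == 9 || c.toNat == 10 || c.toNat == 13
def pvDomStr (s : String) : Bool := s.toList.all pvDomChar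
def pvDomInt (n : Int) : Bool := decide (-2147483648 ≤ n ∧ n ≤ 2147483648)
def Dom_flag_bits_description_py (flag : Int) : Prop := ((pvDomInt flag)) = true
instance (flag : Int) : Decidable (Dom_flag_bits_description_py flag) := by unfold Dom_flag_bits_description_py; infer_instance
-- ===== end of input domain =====

-- B replaces A's scan of the fixed 18-entry (bit, name) table by masking the flag once and then
-- iterating only over the SET bits of the masked value (lowest-set-bit extraction m & -m, a dict
-- keyed by bit value, clearing with m &= m - 1) (objective: alternative).

-- ===== PORT A =====
-- the known_bits table, literally
def pvKnownBits : List (Int × String) :=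
  [(0x00001, "SEFLG_JPLEPH"), (0x00002, "SEFLG_SWIEPH"), (0x00004, "SEFLG_MOSEPH"),
   (0x00008, "SEFLG_HELCTR"), (0x00010, "SEFLG_TRUEPOS"), (0x00020, "SEFLG_J2000"),
   (0x00040, "SEFLG_NONUT"), (0x00080, "SEFLG_SPEED3"), (0x00100, "SEFLG_SPEED"),
   (0x00200, "SEFLG_NOGDEFL"), (0x00400, "SEFLG_NOABERR"), (0x00800, "SEFLG_EQUATORIAL"),
   (0x01000, "SEFLG_XYZ"), (0x02000, "SEFLG_RADIANS"), (0x04000, "SEFLG_BARYCTR"),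
   (0x08000, "SEFLG_TOPOCTR"), (0x10000, "SEFLG_SIDEREAL"), (0x20000, "SEFLG_ICRS")]

def flag_bits_description_py (flag : Int) : String :=
  -- for bit, name in known_bits: if flag & bit: parts.append(name)
  let parts : List String :=
    pvKnownBits.foldl (fun parts bn => if PySem.Int.band flag bn.1 ≠ 0 then parts ++ [bn.2] else parts) []
  -- " | ".join(parts) if parts else "0"
  if parts ≠ [] then PySem.Str.join " | " parts else "0"

-- ===== PORT B =====
-- the module-level _NAMES_BY_BIT dict, literally
def pvNameDict : PySem.Dict Int String :=
  PySem.Dict.ofList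
    [(0x00001, "SEFLG_JPLEPH"), (0x00002, "SEFLG_SWIEPH"), (0x00004, "SEFLG_MOSEPH"),
     (0x00008, "SEFLG_HELCTR"), (0x00010, "SEFLG_TRUEPOS"), (0x00020, "SEFLG_J2000"),
     (0x00040, "SEFLG_NONUT"), (0x00080, "SEFLG_SPEED3"), (0x00100, "SEFLG_SPEED"),
     (0x00200, "SEFLG_NOGDEFL"), (0x00400, "SEFLG_NOABERR"), (0x00800, "SEFLG_EQUATORIAL"),
     (0x01000, "SEFLG_XYZ"), (0x02000, "SEFLG_RADIANS"), (0x04000, "SEFLG_BARYCTR"),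
     (0x08000, "SEFLG_TOPOCTR"), (0x10000, "SEFLG_SIDEREAL"), (0x20000, "SEFLG_ICRS")]

-- B's 'while m:' loop (m is a non-negative Python int after the mask, so it is carried as a Nat);
-- lb = m & -m is ported exactly via PySem.Int.band; _NAMES_BY_BIT[lb] never misses a key (lb is
-- one of the 18 known bit values), so the raising dict indexing is ported as get? with an unused default
def pvAltLoop (m : Nat) (parts : List String) : List String :=
  if _h : m = 0 then parts
  else
    let lb : Nat := (PySem.Int.band (m : Int) (-(m : Int))).toNat
    pvAltLoop (m &&& (m - 1)) (parts ++ [(PySem.Dict.get? pvNameDict (lb : Int)).getD ""])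
termination_by m
decreasing_by exact Nat.lt_of_le_of_lt Nat.and_le_right (by omega)

def flag_bits_description_py_alt (flag : Int) : String :=
  -- m = flag & 0x3FFFF  (non-negative in Python, so carried as a Nat; exact)
  let m : Nat := (PySem.Int.band flag 0x3FFFF).toNat
  let parts := pvAltLoop m []
  -- " | ".join(parts) or "0"
  let s := PySem.Str.join " | " parts
  if s ≠ "" then s else "0"

-- ===== PRECONDITION & SPEC =====
def Spec_flag_bits_description_py (flag : Int) (out : String) : Prop := out = flag_bits_description_py_alt flag
instance (flag : Int) (out : String) : Decidable (Spec_flag_bits_description_py flag out) := by unfold Spec_flag_bits_description_py; infer_instance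

-- ===== CLAIM (what is proved, stated in full; the proofs are below) =====
def Claim_equal_flag_bits_description_py : Prop := ∀ (flag : Int), Dom_flag_bits_description_py flag → Spec_flag_bits_description_py flag (flag_bits_description_py flag)

-- ===== LEMMAS AND PROOFS =====

-- ---- A-side: A's fold equals the names of the set bits of the masked flag, ascending ----

-- bits of the complement (2^n - 1) - x below position n
theorem pv_compl_testBit (n : Nat) : ∀ (x j : Nat), x < 2 ^ n → j < n →
    ((2 ^ n - 1) - x).testBit j = !x.testBit j := by
  induction n with
  | zero => intro x j _ hj; omega
  | succ n ih =>
    intro x j hx hj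
    have hP : 1 ≤ 2 ^ n := Nat.one_le_two_pow
    have h2 : 2 ^ (n + 1) = 2 * 2 ^ n := by ring
    cases j with
    | zero =>
      rw [Nat.testBit_zero, Nat.testBit_zero]
      rcases Nat.mod_two_eq_zero_or_one x with h | h <;>
        · have : (2 ^ (n + 1) - 1 - x) % 2 = 1 - x % 2 := by omega
          simp [this, h]
    | succ j =>
      rw [Nat.testBit_succ, Nat.testBit_succ]
      have hdiv : (2 ^ (n + 1) - 1 - x) / 2 = 2 ^ n - 1 - x / 2 := by omega
      rw [hdiv]
      exact ih (x / 2) j (by omega) (by omega)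

-- the masked value stays below 2^18
theorem pv_mask_lt (flag : Int) : (PySem.Int.band flag 262143).toNat < 2 ^ 18 := by
  by_cases hf : 0 ≤ flag
  · rw [PySem.Int.band_of_nonneg hf (by norm_num)]
    simpa using Nat.and_lt_two_pow flag.toNat (show (262143 : Int).toNat < 2 ^ 18 by decide)
  · have hband : PySem.Int.band flag 262143
        = (((262143 : Nat) - ((262143 : Nat) &&& (-flag - 1).toNat) : Nat) : Int) := by
      simp [PySem.Int.band, hf]
    rw [hband]
    simp only [Int.toNat_natCast]
    omega

-- bit j of the masked value is exactly the truth value of (flag & 2^j) ≠ 0, for j < 18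
theorem pv_band_testBit (flag : Int) (j : Nat) (hj : j < 18) :
    decide (PySem.Int.band flag (((2 : Nat) ^ j : Nat) : Int) ≠ 0)
      = ((PySem.Int.band flag 262143).toNat).testBit j := by
  by_cases hf : 0 ≤ flag
  · rw [PySem.Int.band_of_nonneg hf (by positivity), PySem.Int.band_of_nonneg hf (by norm_num)]
    simp only [Int.toNat_natCast]
    have hmask : ((262143 : Int).toNat : Nat) = 2 ^ 18 - 1 := by decide
    rw [hmask, Nat.testBit_and, Nat.testBit_two_pow_sub_one, decide_eq_true hj, Bool.and_true]
    cases htb : flag.toNat.testBit j <;>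
      simp [Nat.and_two_pow, htb]
  · have hband : ∀ b : Int, 0 ≤ b → PySem.Int.band flag b
        = ((b.toNat - (b.toNat &&& (-flag - 1).toNat) : Nat) : Int) := by
      intro b hb; simp [PySem.Int.band, hf, hb]
    set c : Nat := (-flag - 1).toNat with hc
    rw [hband _ (by positivity), hband _ (by norm_num)]
    simp only [Int.toNat_natCast]
    have hmask : ((262143 : Int).toNat : Nat) = 2 ^ 18 - 1 := by decide
    have hand : (2 ^ 18 - 1) &&& c = c % 2 ^ 18 := by
      rw [Nat.and_comm]; exact Nat.and_two_pow_sub_one_eq_mod c 18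
    rw [hmask, hand,
      pv_compl_testBit 18 (c % 2 ^ 18) j (Nat.mod_lt _ (by norm_num)) hj,
      Nat.testBit_mod_two_pow, decide_eq_true hj, Bool.true_and]
    cases htb : c.testBit j <;>
      simp [Nat.two_pow_and, htb]

def pvNames : List String :=
  ["SEFLG_JPLEPH", "SEFLG_SWIEPH", "SEFLG_MOSEPH", "SEFLG_HELCTR",
   "SEFLG_TRUEPOS", "SEFLG_J2000", "SEFLG_NONUT", "SEFLG_SPEED3",
   "SEFLG_SPEED", "SEFLG_NOGDEFL", "SEFLG_NOABERR", "SEFLG_EQUATORIAL",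
   "SEFLG_XYZ", "SEFLG_RADIANS", "SEFLG_BARYCTR", "SEFLG_TOPOCTR",
   "SEFLG_SIDEREAL", "SEFLG_ICRS"]

-- the table is the name list indexed by bit position
theorem pvKnownBits_eq :
    pvKnownBits = (List.range 18).map (fun j => ((((2 : Nat) ^ j : Nat) : Int), pvNames.getD j "")) := by
  decide

-- ---- B-side: the lowest-set-bit loop produces the same list ----

-- every nonzero Nat is 2^(j+1)*r + 2^j for the least set bit j
theorem pv_decomp (m : Nat) (h : m ≠ 0) : ∃ j r, m = 2 ^ (j + 1) * r + 2 ^ j := by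
  induction m using Nat.strong_induction_on with
  | _ m ih =>
    rcases Nat.even_or_odd m with he | ho
    · obtain ⟨k, hk⟩ := he
      have hk0 : k ≠ 0 := by omega
      obtain ⟨j, r, hjr⟩ := ih k (by omega) hk0
      exact ⟨j + 1, r, by rw [hk, hjr]; ring⟩
    · obtain ⟨k, hk⟩ := ho
      exact ⟨0, k, by rw [pow_one, pow_zero]; omega⟩

-- quotient of a 2^s-decomposition
theorem pv_div_helper (s q b : Nat) (hb : b < 2 ^ s) : (2 ^ s * q + b) / 2 ^ s = q := by
  rw [Nat.mul_add_div (Nat.two_pow_pos s), Nat.div_eq_of_lt hb]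
  omega

theorem pv_testBit_of_decomp (x s q b : Nat) (hx : x = 2 ^ s * q + b) (hb : b < 2 ^ s) :
    x.testBit s = decide (q % 2 = 1) := by
  subst hx
  rw [Nat.testBit_eq_decide_div_mod_eq, pv_div_helper s q b hb]

-- bits of c = 2^(j+1)*r at and below j are clear
theorem pv_tb_c_le (j r k : Nat) (hk : k ≤ j) : (2 ^ (j + 1) * r).testBit k = false := by
  have e : (2 : Nat) ^ (j + 1) = 2 ^ k * (2 * 2 ^ (j - k)) := by
    rw [← pow_succ', ← pow_add]
    congr 1
    omega
  have h1 : 2 ^ (j + 1) * r = 2 ^ k * (2 * (2 ^ (j - k) * r)) + 0 := by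
    rw [e]
    ring
  rw [pv_testBit_of_decomp _ k _ 0 h1 (Nat.two_pow_pos k)]
  simp [Nat.mul_mod_right]

-- bits of m = 2^(j+1)*r + 2^j strictly below j are clear
theorem pv_tb_m_lt (j r k : Nat) (hk : k < j) : (2 ^ (j + 1) * r + 2 ^ j).testBit k = false := by
  have h1 : 2 ^ (j + 1) * r + 2 ^ j = 2 ^ k * (2 * (2 ^ (j - k) * r + 2 ^ (j - k - 1))) + 0 := by
    have e1 : 2 ^ (j + 1) = 2 ^ k * (2 * 2 ^ (j - k)) := by
      rw [← pow_succ', ← pow_add]; congr 1; omega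
    have e2 : 2 ^ j = 2 ^ k * (2 * 2 ^ (j - k - 1)) := by
      rw [← pow_succ', ← pow_add]; congr 1; omega
    rw [e1, e2]; ring
  rw [pv_testBit_of_decomp _ k _ 0 h1 (Nat.two_pow_pos k)]
  simp [Nat.mul_mod_right]

-- bit j of m is set
theorem pv_tb_m_j (j r : Nat) : (2 ^ (j + 1) * r + 2 ^ j).testBit j = true := by
  have h1 : 2 ^ (j + 1) * r + 2 ^ j = 2 ^ j * (2 * r + 1) + 0 := by
    rw [pow_succ']; ring
  rw [pv_testBit_of_decomp _ j _ 0 h1 (Nat.two_pow_pos j)]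
  have h2 : (2 * r + 1) % 2 = 1 := by omega
  rw [h2]
  simp

-- above j, the bits of m and of c agree (and so do those of m - 1)
theorem pv_tb_high (j r k : Nat) (hk : j < k) :
    ((2 ^ (j + 1) * r).testBit k = (2 ^ (j + 1) * r + 2 ^ j).testBit k) ∧
    ((2 ^ (j + 1) * r + 2 ^ j - 1).testBit k = (2 ^ (j + 1) * r + 2 ^ j).testBit k) := by
  set t := k - (j + 1) with ht
  have hr := Nat.div_add_mod r (2 ^ t)
  have hu : r % 2 ^ t < 2 ^ t := Nat.mod_lt _ (Nat.two_pow_pos t)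
  set q := r / 2 ^ t
  set u := r % 2 ^ t
  have hk2 : 2 ^ k = 2 ^ (j + 1) * 2 ^ t := by rw [← pow_add]; congr 1; omega
  have hA : 0 < 2 ^ j := Nat.two_pow_pos j
  have hpw : 2 ^ (j + 1) = 2 * 2 ^ j := by rw [pow_succ']
  -- c = 2^k * q + 2^(j+1) * u
  have hc : 2 ^ (j + 1) * r = 2 ^ k * q + 2 ^ (j + 1) * u := by
    rw [hk2]
    calc 2 ^ (j + 1) * r = 2 ^ (j + 1) * (2 ^ t * q + u) := by rw [hr]
    _ = 2 ^ (j + 1) * 2 ^ t * q + 2 ^ (j + 1) * u := by ring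
  have hXle : 2 ^ (j + 1) * u + 2 ^ (j + 1) ≤ 2 ^ k := by
    rw [hk2]
    calc 2 ^ (j + 1) * u + 2 ^ (j + 1) = 2 ^ (j + 1) * (u + 1) := by ring
    _ ≤ 2 ^ (j + 1) * 2 ^ t := Nat.mul_le_mul_left _ (by omega)
  have hm : 2 ^ (j + 1) * r + 2 ^ j = 2 ^ k * q + (2 ^ (j + 1) * u + 2 ^ j) := by omega
  have hm1 : 2 ^ (j + 1) * r + 2 ^ j - 1 = 2 ^ k * q + (2 ^ (j + 1) * u + 2 ^ j - 1) := by omega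
  constructor
  · rw [pv_testBit_of_decomp _ k q _ hc (by omega),
      pv_testBit_of_decomp _ k q _ hm (by omega)]
  · rw [pv_testBit_of_decomp _ k q _ hm1 (by omega),
      pv_testBit_of_decomp _ k q _ hm (by omega)]

-- bit j of m - 1 is clear
theorem pv_tb_pred_j (j r : Nat) : (2 ^ (j + 1) * r + 2 ^ j - 1).testBit j = false := by
  have hA : 0 < 2 ^ j := Nat.two_pow_pos j
  have hc : 2 ^ (j + 1) * r = 2 ^ j * (2 * r) := by rw [pow_succ']; ring
  have h1 : 2 ^ (j + 1) * r + 2 ^ j - 1 = 2 ^ j * (2 * r) + (2 ^ j - 1) := by omega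
  rw [pv_testBit_of_decomp _ j _ _ h1 (by omega)]
  simp [Nat.mul_mod_right]

-- m &= m - 1 clears exactly the least set bit
theorem pv_land_pred (j r : Nat) :
    (2 ^ (j + 1) * r + 2 ^ j) &&& (2 ^ (j + 1) * r + 2 ^ j - 1) = 2 ^ (j + 1) * r := by
  apply Nat.eq_of_testBit_eq
  intro k
  rw [Nat.testBit_land]
  rcases lt_trichotomy k j with hk | rfl | hk
  · rw [pv_tb_m_lt j r k hk, pv_tb_c_le j r k (by omega)]
    rfl
  · rw [pv_tb_pred_j, pv_tb_c_le _ _ _ le_rfl]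
    simp
  · obtain ⟨h1, h2⟩ := pv_tb_high j r k hk
    rw [h2, ← h1, Bool.and_self]

-- lb = m & -m, computed through PySem.Int.band, is the least set bit 2^j
theorem pv_lowbit (j r : Nat) :
    (PySem.Int.band ((2 ^ (j + 1) * r + 2 ^ j : Nat) : Int) (-((2 ^ (j + 1) * r + 2 ^ j : Nat) : Int))).toNat
      = 2 ^ j := by
  set m : Nat := 2 ^ (j + 1) * r + 2 ^ j with hm
  have hA : 0 < 2 ^ j := Nat.two_pow_pos j
  have hm1 : 1 ≤ m := by omega
  have htn : (-(-(m : Int)) - 1).toNat = m - 1 := by omega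
  have hband : PySem.Int.band (m : Int) (-(m : Int)) = ((m - (m &&& (m - 1)) : Nat) : Int) := by
    unfold PySem.Int.band
    rw [if_pos (Int.natCast_nonneg m), if_neg (show ¬ (0 : Int) ≤ -(m : Int) by omega), htn]
    simp
  rw [hband, Int.toNat_natCast, hm, pv_land_pred j r]
  omega

-- the filter over range n drops the least set bit and keeps the rest
theorem pv_filter_split (p q : Nat → Bool) (j n : Nat) (hjn : j < n)
    (hlow : ∀ k, k < j → p k = false) (hj : p j = true)
    (hqlow : ∀ k, k ≤ j → q k = false) (hhigh : ∀ k, j < k → p k = q k) :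
    (List.range n).filter p = j :: (List.range n).filter q := by
  induction n with
  | zero => omega
  | succ n ih =>
    rw [List.range_succ, List.filter_append, List.filter_append]
    by_cases hn : j < n
    · rw [ih hn]
      have hpn := hhigh n hn
      simp [List.filter_cons, hpn]
    · have hj' : j = n := by omega
      subst hj'
      have h1 : (List.range j).filter p = [] :=
        List.filter_eq_nil_iff.mpr (fun a ha => by simp [hlow a (List.mem_range.1 ha)])
      have h2 : (List.range j).filter q = [] :=
        List.filter_eq_nil_iff.mpr (fun a ha => by simp [hqlow a (Nat.le_of_lt (List.mem_range.1 ha))])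
      rw [h1, h2]
      simp [hj, hqlow j le_rfl]

-- the dict lookup at the bit value 2^j is the j-th name
theorem pv_dict : ∀ j : Nat, j < 18 →
    (PySem.Dict.get? pvNameDict (((2 : Nat) ^ j : Nat) : Int)).getD "" = pvNames.getD j "" := by
  decide

-- B's while-loop produces the names of the set bits of m, in ascending order
theorem pvAltLoop_eq (m : Nat) (hm : m < 2 ^ 18) : ∀ parts : List String,
    pvAltLoop m parts
      = parts ++ ((List.range 18).filter m.testBit).map (fun j => pvNames.getD j "") := by
  induction m using Nat.strong_induction_on with
  | _ m ih =>
    intro parts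
    rw [pvAltLoop]
    by_cases h0 : m = 0
    · subst h0
      simp [Nat.zero_testBit]
    · rw [dif_neg h0]
      obtain ⟨j, r, hmjr⟩ := pv_decomp m h0
      have hA : 0 < 2 ^ j := Nat.two_pow_pos j
      have hj18 : j < 18 := by
        by_contra hge
        have : (2 : Nat) ^ 18 ≤ 2 ^ j := Nat.pow_le_pow_right (by norm_num) (by omega)
        omega
      have hlb : (PySem.Int.band (m : Int) (-(m : Int))).toNat = 2 ^ j := by
        rw [hmjr]; exact pv_lowbit j r
      have hland : m &&& (m - 1) = 2 ^ (j + 1) * r := by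
        rw [hmjr]; exact pv_land_pred j r
      have hlt : 2 ^ (j + 1) * r < m := by omega
      have hfil : (List.range 18).filter m.testBit
          = j :: (List.range 18).filter (2 ^ (j + 1) * r).testBit := by
        rw [hmjr]
        exact pv_filter_split _ _ j 18 hj18
          (fun k hk => pv_tb_m_lt j r k hk) (pv_tb_m_j j r)
          (fun k hk => pv_tb_c_le j r k hk)
          (fun k hk => ((pv_tb_high j r k hk).1).symm)
      rw [hlb, hland, ih _ hlt (by omega), pv_dict j hj18, hfil]
      simp

-- ---- the join tail ----

-- a join of nonempty strings starting with a nonempty string is nonempty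
theorem pv_join_ne_empty (p : String) (rest : List String) (hp : p ≠ "") :
    PySem.Str.join " | " (p :: rest) ≠ "" := by
  intro h
  have hl : (PySem.Str.join " | " (p :: rest)).toList = [] := by rw [h]; rfl
  rw [PySem.Str.toList_join] at hl
  cases rest with
  | nil =>
    rw [List.map_cons, List.map_nil, PySem.Chars.join_singleton] at hl
    exact hp (by cases p; simp_all)
  | cons q rest' =>
    rw [List.map_cons, List.map_cons, PySem.Chars.join_cons_cons] at hl
    simp at hl

-- every name in the table is a nonempty string
theorem pv_names_ne : ∀ j : Nat, j < 18 → pvNames.getD j "" ≠ "" := by decide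

-- ===== VERDICT (by name: the statement is the Claim_ definition above) =====
theorem flag_bits_description_py_spec : Claim_equal_flag_bits_description_py := by
  intro flag _
  unfold Spec_flag_bits_description_py
  simp only [flag_bits_description_py, flag_bits_description_py_alt]
  have hA : pvKnownBits.foldl
        (fun parts bn => if PySem.Int.band flag bn.1 ≠ 0 then parts ++ [bn.2] else parts) []
      = ((List.range 18).filter (fun j => ((PySem.Int.band flag 262143).toNat).testBit j)).map
          (fun j => pvNames.getD j "") := by
    rw [pvKnownBits_eq, List.foldl_map]
    rw [PySem.List.foldl_append_ite (fun j => PySem.Int.band flag (((2 : Nat) ^ j : Nat) : Int) ≠ 0)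
      (fun j => pvNames.getD j "") (List.range 18) []]
    rw [List.filter_congr (fun j hj => pv_band_testBit flag j (List.mem_range.1 hj))]
    simp
  have hB : pvAltLoop (PySem.Int.band flag 0x3FFFF).toNat []
      = ((List.range 18).filter (fun j => ((PySem.Int.band flag 262143).toNat).testBit j)).map
          (fun j => pvNames.getD j "") := by
    rw [pvAltLoop_eq _ (pv_mask_lt flag) []]
    simp
  rw [hA, hB]
  generalize hL :
    ((List.range 18).filter (fun j => ((PySem.Int.band flag 262143).toNat).testBit j)).map
      (fun j => pvNames.getD j "") = L
  cases L with
  | nil => simp [show PySem.Str.join " | " ([] : List String) = "" from rfl]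
  | cons p rest =>
    have hpmem : p ∈ ((List.range 18).filter (fun j => ((PySem.Int.band flag 262143).toNat).testBit j)).map
        (fun j => pvNames.getD j "") := by rw [hL]; exact List.mem_cons_self
    obtain ⟨j, hjmem, rfl⟩ := List.mem_map.1 hpmem
    have hj : j < 18 := List.mem_range.1 (List.mem_of_mem_filter hjmem)
    have hne := pv_join_ne_empty _ rest (pv_names_ne j hj)
    simp
    exact fun hx => absurd hx hne
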